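-- pv_equiv track=rewrite | github.com/aleeds/Group-Theory | groups.py | LargestValence
-- ===== SOURCE A (Python) =====
-- def WhiteheadGraph(s):
--     s = CyclicallyReduce(s)
--     ret = []
--     for i in range(0, len(s)):
--         r = (InverseChar(s[i]), s[(i + 1) % len(s)])
--         ret.append(r)
--     return ret
--
-- def WhiteheadGraphList(sl):
--     ret = []
--     for s in sl:
--         s = CyclicallyReduce(s)
--         for i in WhiteheadGraph(s):
--             ret.append(i)
--     return ret
--
-- def InverseChar(a):
--     if (a.lower() == a):
--         return a.upper()
--     else:
--         return a.lower()
--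
-- def Inverse(x):
--     rx = x[::-1]
--     return ''.join([InverseChar(r) for r in rx])
--
-- def LargestValence(words,generators):
--     graph = WhiteheadGraphList(words)
--     counts = {g : 0 for g in generators}
--     for (a,b) in graph:
--         counts[a] += 1
--         counts[b] += 1
--
--     max_gen = generators[0]
--     max_count = counts[max_gen]
--     for gen,count in counts.items():
--        if max_count < count:
--            max_gen = gen
--            max_count = count
--     return max_gen
--
-- def CyclicallyReduce(word):
--     if word[0] != Inverse(word[-1]):
--         return word
--     else:
--          return CyclicallyReduce(word[1:(len(word) - 1)])
-- ===== SOURCE B (Python) =====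
-- def LargestValence(words, generators):
--     counts = {g: 0 for g in generators}
--     for word in words:
--         i, j = 0, len(word)
--         while i < j and word[i] == word[j - 1].swapcase():
--             i, j = i + 1, j - 1
--         s = word[i:j]
--         n = len(s)
--         for k in range(n):
--             counts[s[k].swapcase()] += 1
--             counts[s[(k + 1) % n]] += 1
--     return max(counts, key=counts.get)
-- ===== Notes on version B (the rewrite author's own statement) =====
-- stated objective: simpler
-- what changed: B never builds the Whitehead-graph pair list: it fuses graph construction into the counting step (one dict update pass per word, with an iterative two-pointer cyclic reduction replacing A's recursive slice-and-recurse) and picks the result with a single max(counts, key=counts.get).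
-- outside the precondition, e.g. on LargestValence(['baB'], ['a', 'A']): A returns 'a', B returns 'a'
import Mathlib
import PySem

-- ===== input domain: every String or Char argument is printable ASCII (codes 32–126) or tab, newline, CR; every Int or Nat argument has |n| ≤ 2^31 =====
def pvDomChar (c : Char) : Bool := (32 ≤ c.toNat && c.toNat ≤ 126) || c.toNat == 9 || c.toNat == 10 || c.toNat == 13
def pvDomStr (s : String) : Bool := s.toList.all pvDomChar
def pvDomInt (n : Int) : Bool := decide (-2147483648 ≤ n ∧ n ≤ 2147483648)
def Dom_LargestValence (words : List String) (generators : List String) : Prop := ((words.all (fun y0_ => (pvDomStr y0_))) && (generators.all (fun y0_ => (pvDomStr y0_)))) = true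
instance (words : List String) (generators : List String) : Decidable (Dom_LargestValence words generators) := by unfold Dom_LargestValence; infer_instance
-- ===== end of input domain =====

-- B fuses A's build-graph-list-then-count into one per-word counting pass with an
-- iterative two-pointer cyclic reduction and a single max selection (objective: simpler).

-- ===== PORT A =====

-- InverseChar(a) on a 1-char string
def pvInverseChar (c : Char) : Char :=
  if PySem.Chars.lowerChar c = c then PySem.Chars.upperChar c else PySem.Chars.lowerChar c

-- Inverse(x) as a list of chars: reverse, then InverseChar each
def pvInverse (l : List Char) : List Char := l.reverse.map pvInverseChar

-- CyclicallyReduce(word); Python raises IndexError on word[0] for the empty word —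
-- those inputs are excluded by Pre_ (the [] branch is unreachable there)
def pvCycRed (l : List Char) : List Char :=
  match l with
  | [] => []
  | c :: rest =>
    -- word[0] != Inverse(word[-1]) (Inverse of the 1-char string word[-1])
    if c ≠ pvInverseChar ((c :: rest).getLast (by simp)) then c :: rest
    else pvCycRed (((c :: rest).drop 1).dropLast)   -- word[1:(len(word) - 1)]
termination_by l.length
decreasing_by simp

-- WhiteheadGraph(s); indices produced by range(0, len(s)) are in range, getD default unused
def pvWhiteheadGraph (s : List Char) : List (Char × Char) :=
  let t := pvCycRed s
  (List.range t.length).foldl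
    (fun ret i => ret ++ [(pvInverseChar (t.getD i ' '), t.getD ((i + 1) % t.length) ' ')]) []

-- WhiteheadGraphList(sl)
def pvWGL (sl : List String) : List (Char × Char) :=
  sl.foldl (fun ret s => ret ++ pvWhiteheadGraph (pvCycRed s.toList)) []

def LargestValence (words : List String) (generators : List String) : String :=
  let graph := pvWGL words
  let counts : PySem.Dict String Int :=
    generators.foldl (fun d g => d.insert g 0) PySem.Dict.empty
  -- counts[a] += 1; counts[b] += 1  (KeyError for a missing key is excluded by Pre_)
  let counts := graph.foldl
    (fun d p => (d.modify (String.ofList [p.1]) 0 (· + 1)).modify (String.ofList [p.2]) 0 (· + 1)) counts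
  let maxGen := generators.getD 0 ""       -- generators[0]; IndexError on [] excluded by Pre_
  let maxCount := counts.getD maxGen 0     -- counts[max_gen], key always present
  (counts.items.foldl (fun st gc => if st.2 < gc.2 then gc else st) (maxGen, maxCount)).1

-- ===== PORT B =====

-- single-char str.swapcase(); exact on the printable-ASCII domain
def pvSwapChar (c : Char) : Char :=
  if PySem.Chars.islower c then PySem.Chars.upperChar c
  else if PySem.Chars.isupper c then PySem.Chars.lowerChar c
  else c

-- the two-pointer while loop of B: while i < j and word[i] == word[j-1].swapcase(): i,j = i+1,j-1
def pvCore (w : List Char) (i j : Nat) : Nat × Nat :=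
  if i < j ∧ w.getD i ' ' = pvSwapChar (w.getD (j - 1) ' ') then pvCore w (i + 1) (j - 1)
  else (i, j)
termination_by j - i
decreasing_by omega

def LargestValence_alt (words : List String) (generators : List String) : String :=
  let counts0 : PySem.Dict String Int :=
    generators.foldl (fun d g => d.insert g 0) PySem.Dict.empty
  let counts := words.foldl (fun d word =>
    let w := word.toList
    let ij := pvCore w 0 w.length
    let s := (w.drop ij.1).take (ij.2 - ij.1)   -- word[i:j] with 0 ≤ i, j ≤ len(word)
    let n := s.length
    (List.range n).foldl
      (fun d k =>
        (d.modify (String.ofList [pvSwapChar (s.getD k ' ')]) 0 (· + 1)).modify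
          (String.ofList [s.getD ((k + 1) % n) ' ']) 0 (· + 1)) d) counts0
  PySem.List.maxD counts.keys (fun g => counts.getD g 0) ""   -- max(counts, key=counts.get)

-- ===== PRECONDITION & SPEC =====
-- Pre_ excludes the inputs where A raises: empty generators (IndexError), a word equal to its own
-- inverse (it cyclically cancels to nothing: IndexError), and a word with a letter or its case-flip
-- missing from generators (KeyError on a surviving letter); the letter condition is stated in closed
-- form on the ORIGINAL word, so it conservatively also excludes rare inputs whose only missing
-- letters are cancelled away, on which A still returns (B returns the same value there).
def pvPreOk (words generators : List String) : Bool :=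
  words.all fun w => (w.toList != pvInverse w.toList) && w.toList.all fun c =>
    generators.contains (String.ofList [c]) && generators.contains (String.ofList [pvInverseChar c])

def Pre_LargestValence (words : List String) (generators : List String) : Prop :=
  generators ≠ [] ∧ pvPreOk words generators = true
instance (words : List String) (generators : List String) : Decidable (Pre_LargestValence words generators) := by
  unfold Pre_LargestValence; infer_instance

def pvWitness_LargestValence : List String × List String := (["ab", "Bcb"], ["a", "A", "b", "B", "c", "C"])

def Spec_LargestValence (words : List String) (generators : List String) (out : String) : Prop :=
  out = LargestValence_alt words generators
instance (words : List String) (generators : List String) (out : String) : Decidable (Spec_LargestValence words generators out) := by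
  unfold Spec_LargestValence; infer_instance

-- ===== CLAIM (what is proved, stated in full; the proofs are below) =====
def Claim_equal_LargestValence : Prop := ∀ (words : List String) (generators : List String), Dom_LargestValence words generators → Pre_LargestValence words generators → Spec_LargestValence words generators (LargestValence words generators)

-- ===== LEMMAS AND PROOFS =====

-- B's swapcase agrees with A's InverseChar on every Char
theorem char_toNat_ofNat (n : Nat) (h : n < 55000) : (Char.ofNat n).toNat = n := by
  have hv : n.isValidChar := Or.inl (by omega)
  simp [Char.ofNat, hv, Char.ofNatAux, Char.toNat]

theorem pvSwapChar_eq_inverseChar (c : Char) : pvSwapChar c = pvInverseChar c := by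
  unfold pvSwapChar pvInverseChar PySem.Chars.lowerChar PySem.Chars.upperChar PySem.Chars.islower PySem.Chars.isupper
  by_cases hu : ('A' ≤ c ∧ c ≤ 'Z') <;> by_cases hl : ('a' ≤ c ∧ c ≤ 'z')
  · exfalso
    have h1 : (65 : Nat) ≤ c.toNat := hu.1
    have h2 : (97 : Nat) ≤ c.toNat := hl.1
    have h3 : c.toNat ≤ (90 : Nat) := hu.2
    omega
  · have hne : Char.ofNat (c.toNat + 32) ≠ c := by
      intro he
      have hb : c.toNat ≤ (90 : Nat) := hu.2
      have := char_toNat_ofNat (c.toNat + 32) (by omega)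
      rw [he] at this; omega
    simp [hu, hl, hne]
  · simp [hu, hl]
  · simp [hu, hl]

-- bounds of the two-pointer loop
theorem pvCore_bounds (w : List Char) (i j : Nat) :
    i ≤ (pvCore w i j).1 ∧ (pvCore w i j).2 ≤ j := by
  induction i, j using pvCore.induct (w := w) with
  | case1 i j h ih => rw [pvCore, if_pos h]; omega
  | case2 i j h => rw [pvCore, if_neg h]; exact ⟨le_refl _, le_refl _⟩

-- indexing into the word with first and last characters stripped
theorem getD_inner (w : List Char) (k : Nat) (hk : k + 3 ≤ w.length) :
    ((w.drop 1).dropLast).getD k ' ' = w.getD (k + 1) ' ' := by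
  simp only [List.getD, List.getElem?_dropLast, List.getElem?_drop, List.length_drop]
  rw [if_pos (show k < w.length - 1 - 1 by omega), Nat.add_comm]

-- shifting the two-pointer loop into the word with first and last stripped
theorem pvCore_shift (w : List Char) (i j : Nat) (hi : 1 ≤ i) (hj : 1 ≤ j)
    (hjn : j + 1 ≤ w.length) :
    pvCore w i j = ((pvCore ((w.drop 1).dropLast) (i - 1) (j - 1)).1 + 1,
                    (pvCore ((w.drop 1).dropLast) (i - 1) (j - 1)).2 + 1) := by
  revert hi hj hjn
  induction i, j using pvCore.induct (w := w) with
  | case1 i j h ih =>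
    intro hi hj hjn
    have hij := h.1
    have e1 : ((w.drop 1).dropLast).getD (i - 1) ' ' = w.getD i ' ' := by
      rw [getD_inner w (i - 1) (by omega)]; congr 1; omega
    have e2 : ((w.drop 1).dropLast).getD (j - 1 - 1) ' ' = w.getD (j - 1) ' ' := by
      rw [getD_inner w (j - 1 - 1) (by omega)]; congr 1; omega
    have hcond : i - 1 < j - 1 ∧ ((w.drop 1).dropLast).getD (i - 1) ' '
        = pvSwapChar (((w.drop 1).dropLast).getD (j - 1 - 1) ' ') := by
      refine ⟨by omega, ?_⟩; rw [e1, e2]; exact h.2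
    rw [pvCore, if_pos h]
    conv_rhs => rw [pvCore, if_pos hcond]
    have ih' := ih (by omega) (by omega) (by omega)
    rw [ih']
    congr 2 <;> congr 2 <;> omega
  | case2 i j h =>
    intro hi hj hjn
    rw [pvCore, if_neg h]
    by_cases hij : i < j
    · have e1 : ((w.drop 1).dropLast).getD (i - 1) ' ' = w.getD i ' ' := by
        rw [getD_inner w (i - 1) (by omega)]; congr 1; omega
      have e2 : ((w.drop 1).dropLast).getD (j - 1 - 1) ' ' = w.getD (j - 1) ' ' := by
        rw [getD_inner w (j - 1 - 1) (by omega)]; congr 1; omega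
      have hcond : ¬ (i - 1 < j - 1 ∧ ((w.drop 1).dropLast).getD (i - 1) ' '
          = pvSwapChar (((w.drop 1).dropLast).getD (j - 1 - 1) ' ')) := by
        rw [e1, e2]; intro hc; exact h ⟨hij, hc.2⟩
      rw [pvCore, if_neg hcond]
      simp; omega
    · have hcond : ¬ (i - 1 < j - 1 ∧ ((w.drop 1).dropLast).getD (i - 1) ' '
          = pvSwapChar (((w.drop 1).dropLast).getD (j - 1 - 1) ' ')) := by
        intro hc; omega
      rw [pvCore, if_neg hcond]
      simp; omega

-- the first and the last character, as the while condition reads them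
theorem getD_zero_cons (c : Char) (rest : List Char) : (c :: rest).getD 0 ' ' = c := rfl

theorem getD_last_cons (c : Char) (rest : List Char) :
    (c :: rest).getD ((c :: rest).length - 1) ' ' = (c :: rest).getLast (by simp) := by
  rw [List.getLast_eq_getElem]
  simp [List.getD]
  rfl

-- B's two-pointer reduction computes A's recursive cyclic reduction
theorem pvCore_red (w : List Char) :
    (w.drop (pvCore w 0 w.length).1).take ((pvCore w 0 w.length).2 - (pvCore w 0 w.length).1)
      = pvCycRed w := by
  induction w using pvCycRed.induct with
  | case1 =>
    rw [pvCore, if_neg (by intro hc; simp at hc)]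
    simp [pvCycRed]
  | case2 c rest hne =>
    have hcond : ¬ (0 < (c :: rest).length ∧ (c :: rest).getD 0 ' '
        = pvSwapChar ((c :: rest).getD ((c :: rest).length - 1) ' ')) := by
      intro hc
      exact hne (by rw [← getD_last_cons, ← pvSwapChar_eq_inverseChar, ← hc.2, getD_zero_cons])
    rw [pvCore, if_neg hcond, pvCycRed, if_pos hne]
    simp
  | case3 c rest heq ih =>
    have heq' : c = pvInverseChar ((c :: rest).getLast (by simp)) := by
      by_contra hne; exact heq hne
    have hcond : (0 < (c :: rest).length ∧ (c :: rest).getD 0 ' '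
        = pvSwapChar ((c :: rest).getD ((c :: rest).length - 1) ' ')) := by
      refine ⟨by simp, ?_⟩
      rw [getD_zero_cons, getD_last_cons, pvSwapChar_eq_inverseChar]
      exact heq'
    rw [pvCore, if_pos hcond, pvCycRed, if_neg heq]
    rcases rest with _ | ⟨d, rest'⟩
    · -- length 1 : the loop overshoots to (1, 0); both sides are the empty list
      rw [pvCore, if_neg (by intro hc; simp at hc)]
      simp [pvCycRed]
    · -- length ≥ 2 : shift the loop into the stripped word and use the inductive hypothesis
      have hshift := pvCore_shift (c :: d :: rest') 1 ((c :: d :: rest').length - 1)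
        (le_refl 1) (by simp) (by simp)
      have hb := (pvCore_bounds ((d :: rest').dropLast) 0 ((d :: rest').dropLast.length)).2
      simp only [List.drop_succ_cons, List.drop_zero, List.length_cons, Nat.add_sub_cancel,
        Nat.sub_self, List.length_dropLast] at hshift ih hb ⊢
      rw [show (0 + 1 : Nat) = 1 from rfl, hshift]
      rcases hp : pvCore (d :: rest').dropLast 0 rest'.length with ⟨a, b⟩
      rw [hp] at ih hb
      simp only [List.drop_succ_cons]
      rw [show b + 1 - (a + 1) = b - a by omega, ← ih,
          List.dropLast_eq_take, List.drop_take, List.take_take]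
      congr 1
      simp only [List.length_cons]
      omega

-- reducing twice is reducing once
theorem pvCycRed_idem (l : List Char) : pvCycRed (pvCycRed l) = pvCycRed l := by
  induction l using pvCycRed.induct with
  | case1 =>
    have h0 : pvCycRed ([] : List Char) = [] := by rw [pvCycRed]
    rw [h0, h0]
  | case2 c rest hne =>
    have h : pvCycRed (c :: rest) = c :: rest := by rw [pvCycRed, if_pos hne]
    rw [h, h]
  | case3 c rest heq ih =>
    rw [show pvCycRed (c :: rest) = pvCycRed ((List.drop 1 (c :: rest)).dropLast) from by
      rw [pvCycRed, if_neg heq]]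
    exact ih

-- the two counting loops build the same dict
theorem counts_eq (words : List String) (d : PySem.Dict String Int) :
    (pvWGL words).foldl
      (fun d p => (d.modify (String.ofList [p.1]) 0 (· + 1)).modify (String.ofList [p.2]) 0 (· + 1)) d
    = words.foldl (fun d word =>
        let w := word.toList
        let ij := pvCore w 0 w.length
        let s := (w.drop ij.1).take (ij.2 - ij.1)
        let n := s.length
        (List.range n).foldl
          (fun d k =>
            (d.modify (String.ofList [pvSwapChar (s.getD k ' ')]) 0 (· + 1)).modify
              (String.ofList [s.getD ((k + 1) % n) ' ']) 0 (· + 1)) d) d := by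
  unfold pvWGL
  rw [PySem.List.foldl_append_eq_flatMap, List.nil_append, List.foldl_flatMap]
  apply PySem.List.foldl_congr_mem
  intro d w _
  simp only [pvSwapChar_eq_inverseChar, pvCore_red]
  unfold pvWhiteheadGraph
  rw [pvCycRed_idem, PySem.List.foldl_append_singleton_eq_map, List.nil_append, List.foldl_map]

-- A's items scan carried as a (key, value) pair mirrors the bare key fold
theorem scan_fold_pairs (f : String → Int) (l : List String) : ∀ (m : String),
    (l.map (fun k => (k, f k))).foldl (fun st gc => if st.2 < gc.2 then gc else st) (m, f m)
      = ((l.foldl (fun r x => if f r < f x then x else r) m),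
         f (l.foldl (fun r x => if f r < f x then x else r) m)) := by
  induction l with
  | nil => intro m; rfl
  | cons x xs ih =>
    intro m
    rw [List.map_cons, List.foldl_cons, List.foldl_cons]
    by_cases h : f m < f x
    · simp only [if_pos h]
      exact ih x
    · simp only [if_neg h]
      exact ih m

-- Python's max over a nonempty list keeps the first strictly-largest element
theorem max?_cons (f : String → Int) : ∀ (ktail : List String) (g0 : String),
    PySem.List.max? (g0 :: ktail) f
      = some (ktail.foldl (fun r x => if f r < f x then x else r) g0) := by
  intro ktail
  induction ktail with
  | nil => intro g0; rfl
  | cons x xs ih =>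
    intro g0
    have h1 : PySem.List.max? (g0 :: x :: xs) f
        = PySem.List.max? ((if f g0 < f x then x else g0) :: xs) f := by
      simp only [PySem.List.max?, List.foldl_cons]
      congr 1
      by_cases h : f g0 < f x <;> simp [h]
    rw [h1, ih, List.foldl_cons]

-- A's strict-< scan over items equals Python's max(keys, key=get)
theorem scan_eq_maxD (g0 : String) (ktail : List String) (f : String → Int) :
    (((g0 :: ktail).map (fun k => (k, f k))).foldl
        (fun st gc => if st.2 < gc.2 then gc else st) (g0, f g0)).1
      = PySem.List.maxD (g0 :: ktail) f "" := by
  unfold PySem.List.maxD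
  rw [List.map_cons, List.foldl_cons, max?_cons]
  simp only [lt_self_iff_false, if_false]
  rw [scan_fold_pairs]
  rfl

-- inserting a key appends it to the key list exactly when it is new
theorem keys_insert' (d : PySem.Dict String Int) (k : String) (v : Int) :
    (d.insert k v).keys = PySem.Set.add d.keys k := by
  have h := PySem.Dict.keys_foldl_insert [k] (fun _ _ => v) d
  simpa [PySem.Set.update] using h

-- adding to a nonempty set keeps its first element
theorem set_add_cons (x y : String) (s : List String) :
    ∃ t, PySem.Set.add (x :: s) y = x :: t := by
  unfold PySem.Set.add
  split
  · exact ⟨s, rfl⟩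
  · exact ⟨s ++ [y], rfl⟩

-- updating a nonempty set keeps its first element
theorem set_update_cons (l : List String) : ∀ (x : String) (s : List String),
    ∃ t, PySem.Set.update (x :: s) l = x :: t := by
  induction l with
  | nil => exact fun x s => ⟨s, rfl⟩
  | cons y ys ih =>
    intro x s
    obtain ⟨t0, ht0⟩ := set_add_cons x y s
    obtain ⟨t1, ht1⟩ := ih x t0
    exact ⟨t1, by rw [PySem.Set.update, List.foldl_cons, ht0]; exact ht1⟩

-- the invariant carried through the counting loops: the key list starts at g0 and stays duplicate-free
def KeysInv (g0 : String) (d : PySem.Dict String Int) : Prop :=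
  (∃ t, d.keys = g0 :: t) ∧ d.keys.Nodup

theorem keysInv_modify (g0 k : String) (v0 : Int) (f : Int → Int) (d : PySem.Dict String Int)
    (h : KeysInv g0 d) : KeysInv g0 (d.modify k v0 f) := by
  obtain ⟨⟨t, ht⟩, hnd⟩ := h
  have hk : (d.modify k v0 f).keys = PySem.Set.add d.keys k := keys_insert' d k _
  constructor
  · rw [hk, ht]; exact set_add_cons g0 k t
  · rw [hk]; exact PySem.Set.nodup_add d.keys k hnd

theorem keysInv_init (g0 : String) (gs : List String) :
    KeysInv g0 ((g0 :: gs).foldl (fun d g => d.insert g 0) (PySem.Dict.empty : PySem.Dict String Int)) := by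
  have hk : ((g0 :: gs).foldl (fun d g => d.insert g 0) (PySem.Dict.empty : PySem.Dict String Int)).keys
      = PySem.Set.update ([] : PySem.Set String) (g0 :: gs) :=
    PySem.Dict.keys_foldl_insert (g0 :: gs) (fun _ _ => 0) PySem.Dict.empty
  constructor
  · rw [hk, PySem.Set.update, List.foldl_cons]
    exact set_update_cons gs g0 []
  · rw [hk]
    exact PySem.Set.nodup_ofList (g0 :: gs)

-- ===== VERDICT (by name: the statement is the Claim_ definition above) =====
theorem LargestValence_spec : Claim_equal_LargestValence := by
  intro words generators _ hpre
  obtain ⟨hgen, -⟩ := hpre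
  rcases generators with _ | ⟨g0, gs⟩
  · exact absurd rfl hgen
  unfold Spec_LargestValence
  simp only [LargestValence, LargestValence_alt]
  rw [counts_eq]
  set D := words.foldl (fun d word =>
        let w := word.toList
        let ij := pvCore w 0 w.length
        let s := (w.drop ij.1).take (ij.2 - ij.1)
        let n := s.length
        (List.range n).foldl
          (fun d k =>
            (d.modify (String.ofList [pvSwapChar (s.getD k ' ')]) 0 (· + 1)).modify
              (String.ofList [s.getD ((k + 1) % n) ' ']) 0 (· + 1)) d)
      ((g0 :: gs).foldl (fun d g => d.insert g 0) (PySem.Dict.empty : PySem.Dict String Int)) with hD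
  have hinv : KeysInv g0 D := by
    rw [hD]
    refine List.foldlRecOn words _ (keysInv_init g0 gs) ?_
    intro d hd word _
    refine List.foldlRecOn _ _ hd ?_
    intro d' hd' k _
    exact keysInv_modify g0 _ 0 _ _ (keysInv_modify g0 _ 0 _ _ hd')
  obtain ⟨⟨ktail, hk⟩, hnd⟩ := hinv
  rw [PySem.Dict.items_eq_map_keys D hnd 0, hk]
  rw [show (g0 :: gs).getD 0 "" = g0 from rfl]
  exact scan_eq_maxD g0 ktail (fun g => D.getD g 0)
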